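-- pv_equiv track=rewrite | github.com/ShootBrix/Python-Project-AI | homework6_dbg5309.py | words_counter_per_tag
-- ===== SOURCE A (Python) =====
-- def words_counter_per_tag(corpus):
--     tag_counters = {}
--     for tuples in corpus:
--         for (word, tag) in tuples:
--             try:
--                 try:
--                     tag_counters[tag][word] += 1
--                 except:
--                     tag_counters[tag][word] = 1
--             except:
--                 tag_counters[tag] = {word: 1}
--
--     return tag_counters
-- ===== SOURCE B (Python) =====
-- def words_counter_per_tag(corpus):
--     # Pass 1: one flat table counting (tag, word) pairs.
--     flat = {}
--     for tuples in corpus: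
--         for (word, tag) in tuples:
--             key = (tag, word)
--             flat[key] = flat.get(key, 0) + 1
--     # Pass 2: regroup the flat table into {tag: {word: count}}.
--     result = {}
--     for (tag, word), count in flat.items():
--         inner = result.get(tag, {})
--         inner[word] = count
--         result[tag] = inner
--     return result
-- ===== Notes on version B (the rewrite author's own statement) =====
-- stated objective: alternative
-- what changed: Replaces lazy-init nested-dict counting (try/except increment into dict-of-dicts) by a two-pass decomposition: a single flat table counting (tag, word) pairs, then a separate regrouping pass over the flat table's items into the nested result.
import Mathlib
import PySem

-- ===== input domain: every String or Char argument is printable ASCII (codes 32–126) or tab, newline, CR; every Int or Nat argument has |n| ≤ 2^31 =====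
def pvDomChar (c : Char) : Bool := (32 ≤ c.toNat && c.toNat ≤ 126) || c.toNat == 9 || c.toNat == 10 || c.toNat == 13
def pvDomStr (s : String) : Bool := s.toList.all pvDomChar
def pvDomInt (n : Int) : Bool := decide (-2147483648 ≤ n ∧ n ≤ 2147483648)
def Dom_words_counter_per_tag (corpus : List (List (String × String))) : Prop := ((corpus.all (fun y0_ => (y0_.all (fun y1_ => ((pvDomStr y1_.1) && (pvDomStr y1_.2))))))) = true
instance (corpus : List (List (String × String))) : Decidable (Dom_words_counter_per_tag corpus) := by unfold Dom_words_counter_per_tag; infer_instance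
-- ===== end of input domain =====

-- B replaces A's lazy-init nested-dict counting by two separate passes (flat (tag,word) count table,
-- then a regrouping pass into the nested dict); same cost, different decomposition (objective: alternative).

-- ===== PORT A =====
-- the nested try/except body: increment tag_counters[tag][word], initialising inner dict / entry on KeyError
def wcptStepA (d : PySem.Dict String (PySem.Dict String Int)) (p : String × String) :
    PySem.Dict String (PySem.Dict String Int) :=
  match d.get? p.2 with
  | some inner =>
    match inner.get? p.1 with
    | some c => d.insert p.2 (inner.insert p.1 (c + 1))
    | none   => d.insert p.2 (inner.insert p.1 1)
  | none => d.insert p.2 (PySem.Dict.empty.insert p.1 1)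

def words_counter_per_tag (corpus : List (List (String × String))) :
    List (String × List (String × Int)) :=
  (corpus.foldl (fun d tuples => tuples.foldl wcptStepA d) PySem.Dict.empty).items.map
    (fun q => (q.1, q.2.items))

-- ===== PORT B =====
-- pass 1 step: flat[(tag, word)] = flat.get((tag, word), 0) + 1
def wcptFlatStep (f : PySem.Dict (String × String) Int) (p : String × String) :
    PySem.Dict (String × String) Int :=
  f.insert (p.2, p.1) (f.getD (p.2, p.1) 0 + 1)

-- pass 2 step: inner = result.get(tag, {}); inner[word] = count; result[tag] = inner
def wcptRegroupStep (r : PySem.Dict String (PySem.Dict String Int))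
    (q : (String × String) × Int) : PySem.Dict String (PySem.Dict String Int) :=
  let inner := r.getD q.1.1 PySem.Dict.empty
  r.insert q.1.1 (inner.insert q.1.2 q.2)

def words_counter_per_tag_alt (corpus : List (List (String × String))) :
    List (String × List (String × Int)) :=
  let flat := corpus.foldl (fun f tuples => tuples.foldl wcptFlatStep f) PySem.Dict.empty
  let result := flat.items.foldl wcptRegroupStep PySem.Dict.empty
  result.items.map (fun q => (q.1, q.2.items))

-- ===== PRECONDITION & SPEC =====
def Spec_words_counter_per_tag (corpus : List (List (String × String))) (out : List (String × List (String × Int))) : Prop := out = words_counter_per_tag_alt corpus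
instance (corpus : List (List (String × String))) (out : List (String × List (String × Int))) : Decidable (Spec_words_counter_per_tag corpus out) := by unfold Spec_words_counter_per_tag; infer_instance

-- ===== CLAIM (what is proved, stated in full; the proofs are below) =====
def Claim_equal_words_counter_per_tag : Prop := ∀ (corpus : List (List (String × String))), Dom_words_counter_per_tag corpus → Spec_words_counter_per_tag corpus (words_counter_per_tag corpus)

-- ===== LEMMAS AND PROOFS =====

-- the canonical value both folds reach, phrased over the flattened pair list
def wcptKey (p : String × String) : String × String := (p.2, p.1)

def wcptTags (ps : List (String × String)) : List String := PySem.Set.ofList (ps.map (·.2))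

def wcptWords (ps : List (String × String)) (t : String) : List String :=
  PySem.Set.ofList ((ps.filter (fun p => p.2 == t)).map (·.1))

def wcptInner (ps : List (String × String)) (t : String) : PySem.Dict String Int :=
  PySem.Dict.mk ((wcptWords ps t).map (fun w => (w, (ps.count (w, t) : Int))))

def wcptCanon (ps : List (String × String)) : PySem.Dict String (PySem.Dict String Int) :=
  PySem.Dict.mk ((wcptTags ps).map (fun t => (t, wcptInner ps t)))

theorem wcpt_get?_mk_map {ν : Type} (T : List String) (v : String → ν) (hT : T.Nodup)
    (t : String) :
    (PySem.Dict.mk (T.map (fun x => (x, v x)))).get? t = if t ∈ T then some (v t) else none := by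
  induction T with
  | nil => simp [PySem.Dict.get?]
  | cons x xs ih =>
    simp only [List.map_cons, PySem.Dict.get?_mk_cons, List.nodup_cons] at *
    by_cases h : x = t
    · subst h; simp [hT.1]
    · simp [h, ih hT.2, Ne.symm h]

theorem wcpt_contains_mk_map {ν : Type} (T : List String) (v : String → ν) (t : String) :
    (PySem.Dict.mk (T.map (fun x => (x, v x)))).contains t = decide (t ∈ T) := by
  simp only [PySem.Dict.contains_mk, List.any_map, Function.comp_def]
  rw [Bool.eq_iff_iff]
  simp only [decide_eq_true_eq, List.any_eq_true, beq_iff_eq]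
  exact ⟨fun ⟨x, hx, he⟩ => he ▸ hx, fun h => ⟨t, h, rfl⟩⟩

theorem wcpt_replace_map {ν : Type} (T : List String) (v : String → ν) (t : String) (nv : ν) :
    (T.map (fun x => (x, v x))).map (fun q => if q.1 == t then (t, nv) else q)
      = T.map (fun x => (x, if x = t then nv else v x)) := by
  rw [List.map_map]
  apply List.map_congr_left
  intro x _
  by_cases h : x = t
  · subst h; simp
  · simp [h]




theorem wcpt_inner_append_ne (ps : List (String × String)) (w t t' : String) (h : t' ≠ t) :
    wcptInner (ps ++ [(w, t)]) t' = wcptInner ps t' := by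
  unfold wcptInner wcptWords
  rw [List.filter_append]
  have h1 : (([(w, t)] : List (String × String)).filter (fun p => p.2 == t')) = [] := by
    simp [h.symm]
  rw [h1, List.append_nil]
  apply congrArg
  apply List.map_congr_left
  intro x hx
  have h2 : List.count (x, t') (ps ++ [(w, t)]) = List.count (x, t') ps := by
    rw [List.count_append]
    simp [h.symm]
  rw [h2]

theorem wcpt_tags_append (ps : List (String × String)) (w t : String) :
    wcptTags (ps ++ [(w, t)]) = PySem.Set.add (wcptTags ps) t := by
  unfold wcptTags
  simp only [List.map_append, List.map_singleton]
  rw [PySem.Set.ofList_append_singleton]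

theorem wcpt_words_append_self (ps : List (String × String)) (w t : String) :
    wcptWords (ps ++ [(w, t)]) t = PySem.Set.add (wcptWords ps t) w := by
  unfold wcptWords
  rw [List.filter_append]
  simp only [List.filter_cons, List.filter_nil, beq_self_eq_true, if_pos]
  simp only [List.map_append, List.map_singleton]
  rw [PySem.Set.ofList_append_singleton]

theorem wcpt_mem_words_of_mem (ps : List (String × String)) (w t : String)
    (h : (w, t) ∈ ps) : w ∈ wcptWords ps t := by
  unfold wcptWords
  rw [PySem.Set.mem_ofList]
  exact List.mem_map.2 ⟨(w, t), List.mem_filter.2 ⟨h, by simp⟩, rfl⟩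

theorem wcpt_count_zero_of_not_words (ps : List (String × String)) (w t : String)
    (hw : w ∉ wcptWords ps t) : ps.count (w, t) = 0 := by
  rw [List.count_eq_zero]
  exact fun hmem => hw (wcpt_mem_words_of_mem ps w t hmem)

theorem wcpt_count_append_self (ps : List (String × String)) (x w t : String) :
    (ps ++ [(w, t)]).count (x, t) = ps.count (x, t) + (if x = w then 1 else 0) := by
  rw [List.count_append]
  by_cases h : x = w
  · subst h; simp
  · simp [h, Ne.symm h]

theorem wcpt_foldA_eq_canon (ps : List (String × String)) :
    ps.foldl wcptStepA PySem.Dict.empty = wcptCanon ps := by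
  induction ps using List.reverseRecOn with
  | nil => rfl
  | append_singleton ps p ih =>
    rw [List.foldl_concat, ih]
    obtain ⟨w, t⟩ := p
    have hT : (wcptTags ps).Nodup := PySem.Set.nodup_ofList _
    have hget : (wcptCanon ps).get? t = if t ∈ wcptTags ps then some (wcptInner ps t) else none :=
      wcpt_get?_mk_map _ _ hT t
    show (match (wcptCanon ps).get? t with
      | some inner =>
        match inner.get? w with
        | some c => (wcptCanon ps).insert t (inner.insert w (c + 1))
        | none   => (wcptCanon ps).insert t (inner.insert w 1)
      | none => (wcptCanon ps).insert t (PySem.Dict.empty.insert w 1)) = wcptCanon (ps ++ [(w, t)])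
    by_cases ht : t ∈ wcptTags ps
    · rw [hget, if_pos ht]
      show (match (wcptInner ps t).get? w with
        | some c => (wcptCanon ps).insert t ((wcptInner ps t).insert w (c + 1))
        | none   => (wcptCanon ps).insert t ((wcptInner ps t).insert w 1)) = wcptCanon (ps ++ [(w, t)])
      have hW : (wcptWords ps t).Nodup := PySem.Set.nodup_ofList _
      have hgetin : (wcptInner ps t).get? w
          = if w ∈ wcptWords ps t then some ((ps.count (w, t) : Int)) else none :=
        wcpt_get?_mk_map _ _ hW w
      have houter : ∀ inner' : PySem.Dict String Int,
          inner' = wcptInner (ps ++ [(w, t)]) t →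
          (wcptCanon ps).insert t inner' = wcptCanon (ps ++ [(w, t)]) := by
        intro inner' hinner'
        apply PySem.Dict.ext
        rw [PySem.Dict.items_insert_of_contains _ _
          (by rw [show wcptCanon ps = PySem.Dict.mk ((wcptTags ps).map (fun x => (x, wcptInner ps x))) from rfl,
                  wcpt_contains_mk_map]; exact decide_eq_true ht)]
        show ((wcptTags ps).map (fun x => (x, wcptInner ps x))).map _ = _
        rw [wcpt_replace_map]
        show _ = (wcptTags (ps ++ [(w, t)])).map (fun t' => (t', wcptInner (ps ++ [(w, t)]) t'))
        rw [wcpt_tags_append, PySem.Set.add_of_mem ht]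
        apply List.map_congr_left
        intro x hx
        by_cases hxt : x = t
        · subst hxt; simp [hinner']
        · simp [hxt, wcpt_inner_append_ne ps w t x hxt]
      by_cases hw : w ∈ wcptWords ps t
      · rw [hgetin, if_pos hw]
        show (wcptCanon ps).insert t ((wcptInner ps t).insert w ((ps.count (w, t) : Int) + 1)) = _
        apply houter
        apply PySem.Dict.ext
        rw [PySem.Dict.items_insert_of_contains _ _
          (by rw [show wcptInner ps t = PySem.Dict.mk ((wcptWords ps t).map (fun x => (x, (ps.count (x, t) : Int)))) from rfl,
                  wcpt_contains_mk_map]; exact decide_eq_true hw)]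
        show ((wcptWords ps t).map (fun x => (x, (ps.count (x, t) : Int)))).map _ = _
        rw [wcpt_replace_map]
        show _ = (wcptWords (ps ++ [(w, t)]) t).map (fun w' => (w', ((ps ++ [(w, t)]).count (w', t) : Int)))
        rw [wcpt_words_append_self, PySem.Set.add_of_mem hw]
        apply List.map_congr_left
        intro x hx
        rw [wcpt_count_append_self]
        by_cases hxw : x = w
        · subst hxw; simp
        · simp [hxw]
      · rw [hgetin, if_neg hw]
        show (wcptCanon ps).insert t ((wcptInner ps t).insert w 1) = _
        apply houter
        apply PySem.Dict.ext
        rw [PySem.Dict.items_insert_of_not_contains _ _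
          (by rw [show wcptInner ps t = PySem.Dict.mk ((wcptWords ps t).map (fun x => (x, (ps.count (x, t) : Int)))) from rfl,
                  wcpt_contains_mk_map]; exact decide_eq_false hw)]
        show (wcptWords ps t).map (fun x => (x, (ps.count (x, t) : Int))) ++ [(w, 1)] = _
        show _ = (wcptWords (ps ++ [(w, t)]) t).map (fun w' => (w', ((ps ++ [(w, t)]).count (w', t) : Int)))
        rw [wcpt_words_append_self, PySem.Set.add_of_not_mem hw, List.map_append]
        congr 1
        · apply List.map_congr_left
          intro x hx
          rw [wcpt_count_append_self]
          have hxw : x ≠ w := fun h => hw (h ▸ hx)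
          simp [hxw]
        · simp [wcpt_count_zero_of_not_words ps w t hw]
    · rw [hget, if_neg ht]
      show (wcptCanon ps).insert t (PySem.Dict.empty.insert w 1) = _
      apply PySem.Dict.ext
      rw [PySem.Dict.items_insert_of_not_contains _ _
        (by rw [show wcptCanon ps = PySem.Dict.mk ((wcptTags ps).map (fun x => (x, wcptInner ps x))) from rfl,
                wcpt_contains_mk_map]; exact decide_eq_false ht)]
      show (wcptTags ps).map (fun x => (x, wcptInner ps x)) ++ [(t, PySem.Dict.empty.insert w 1)] = _
      show _ = (wcptTags (ps ++ [(w, t)])).map (fun t' => (t', wcptInner (ps ++ [(w, t)]) t'))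
      rw [wcpt_tags_append, PySem.Set.add_of_not_mem ht, List.map_append]
      congr 1
      · apply List.map_congr_left
        intro x hx
        have hxt : x ≠ t := fun h => ht (h ▸ hx)
        simp [wcpt_inner_append_ne ps w t x hxt]
      · have hfilter : ps.filter (fun p => p.2 == t) = [] := by
          rw [List.filter_eq_nil_iff]
          intro p hp hpt
          apply ht
          unfold wcptTags
          rw [PySem.Set.mem_ofList]
          exact List.mem_map.2 ⟨p, hp, (by simpa using hpt)⟩
        have hw0 : ps.count (w, t) = 0 := by
          rw [List.count_eq_zero]
          intro hmem
          have : (w, t) ∈ ps.filter (fun p => p.2 == t) := List.mem_filter.2 ⟨hmem, by simp⟩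
          rw [hfilter] at this; exact absurd this (List.not_mem_nil)
        simp only [List.map_singleton]
        have : wcptInner (ps ++ [(w, t)]) t = PySem.Dict.empty.insert w 1 := by
          unfold wcptInner
          rw [wcpt_words_append_self]
          unfold wcptWords at *
          rw [hfilter]
          simp only [List.map_nil]
          show PySem.Dict.mk ((PySem.Set.add (PySem.Set.ofList []) w).map _) = _
          rw [show (PySem.Set.add (PySem.Set.ofList ([] : List String)) w) = [w] from rfl]
          simp only [List.map_singleton]
          rw [wcpt_count_append_self, hw0]
          simp
          rfl
        rw [this]

theorem wcpt_regroup (S : List (String × String)) (c : (String × String) → Int) (hS : S.Nodup) :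
    (S.map (fun k => (k, c k))).foldl wcptRegroupStep PySem.Dict.empty
      = PySem.Dict.mk ((PySem.Set.ofList (S.map Prod.fst)).map (fun t =>
          (t, PySem.Dict.mk ((S.filter (fun k => k.1 == t)).map (fun k => (k.2, c k)))))) := by
  induction S using List.reverseRecOn with
  | nil => rfl
  | append_singleton S k ih =>
    obtain ⟨t, w⟩ := k
    rw [List.nodup_append] at hS
    obtain ⟨hS', -, hdisj⟩ := hS
    have hk : (t, w) ∉ S := fun hmem => hdisj _ hmem _ (by simp) rfl
    rw [List.map_append, List.map_singleton, List.foldl_concat, ih hS']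
    have hT : (PySem.Set.ofList (S.map Prod.fst)).Nodup := PySem.Set.nodup_ofList _
    have hget : (PySem.Dict.mk ((PySem.Set.ofList (S.map Prod.fst)).map (fun t' =>
        (t', PySem.Dict.mk ((S.filter (fun k => k.1 == t')).map (fun k => (k.2, c k))))))).get? t
        = if t ∈ PySem.Set.ofList (S.map Prod.fst)
            then some (PySem.Dict.mk ((S.filter (fun k => k.1 == t)).map (fun k => (k.2, c k))))
            else none := wcpt_get?_mk_map _ _ hT t
    show (PySem.Dict.mk ((PySem.Set.ofList (S.map Prod.fst)).map (fun t' =>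
        (t', PySem.Dict.mk ((S.filter (fun k => k.1 == t')).map (fun k => (k.2, c k))))))).insert t
        (((PySem.Dict.mk ((PySem.Set.ofList (S.map Prod.fst)).map (fun t' =>
          (t', PySem.Dict.mk ((S.filter (fun k => k.1 == t')).map (fun k => (k.2, c k))))))).getD t
            PySem.Dict.empty).insert w (c (t, w))) = _
    rw [PySem.Dict.getD_eq_get?_getD, hget]
    have htags : PySem.Set.ofList ((S ++ [(t, w)]).map Prod.fst)
        = PySem.Set.add (PySem.Set.ofList (S.map Prod.fst)) t := by
      simp only [List.map_append, List.map_singleton]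
      rw [PySem.Set.ofList_append_singleton]
    by_cases ht : t ∈ PySem.Set.ofList (S.map Prod.fst)
    · rw [if_pos ht]
      simp only [Option.getD_some]
      apply PySem.Dict.ext
      have hcontw : (PySem.Dict.mk ((S.filter (fun k => k.1 == t)).map
          (fun k => (k.2, c k)))).contains w = false := by
        rw [PySem.Dict.contains_mk, List.any_map]
        rw [List.any_eq_false]
        intro k hkf
        simp only [Function.comp_apply]
        intro he
        have hkt : k.1 = t := by simpa using (List.mem_filter.mp hkf).2
        have : k = (t, w) := Prod.ext hkt (by simpa using he)
        exact hk (this ▸ (List.mem_filter.mp hkf).1)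
      rw [PySem.Dict.items_insert_of_contains _ _
        (by rw [wcpt_contains_mk_map]; exact decide_eq_true ht)]
      show ((PySem.Set.ofList (S.map Prod.fst)).map (fun x => (x, PySem.Dict.mk
        ((S.filter (fun k => k.1 == x)).map (fun k => (k.2, c k)))))).map _ = _
      rw [wcpt_replace_map]
      show _ = (PySem.Set.ofList ((S ++ [(t, w)]).map Prod.fst)).map (fun t' =>
        (t', PySem.Dict.mk (((S ++ [(t, w)]).filter (fun k => k.1 == t')).map (fun k => (k.2, c k)))))
      rw [htags, PySem.Set.add_of_mem ht]
      apply List.map_congr_left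
      intro x hx
      by_cases hxt : x = t
      · rw [if_pos hxt]
        subst hxt
        refine congrArg _ ?_
        apply PySem.Dict.ext
        rw [PySem.Dict.items_insert_of_not_contains _ _ hcontw]
        show (S.filter (fun k => k.1 == x)).map (fun k => (k.2, c k)) ++ [(w, c (x, w))] = _
        rw [List.filter_append]
        simp
      · simp only [if_neg hxt]
        rw [List.filter_append]
        have : (([(t, w)] : List (String × String)).filter (fun k => k.1 == x)) = [] := by
          simp [Ne.symm hxt]
        rw [this, List.append_nil]
    · rw [if_neg ht]
      simp only [Option.getD_none]
      apply PySem.Dict.ext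
      rw [PySem.Dict.items_insert_of_not_contains _ _
        (by rw [wcpt_contains_mk_map]; exact decide_eq_false ht)]
      show (PySem.Set.ofList (S.map Prod.fst)).map (fun x => (x, PySem.Dict.mk
        ((S.filter (fun k => k.1 == x)).map (fun k => (k.2, c k))))) ++ [(t, PySem.Dict.empty.insert w (c (t, w)))] = _
      show _ = (PySem.Set.ofList ((S ++ [(t, w)]).map Prod.fst)).map (fun t' =>
        (t', PySem.Dict.mk (((S ++ [(t, w)]).filter (fun k => k.1 == t')).map (fun k => (k.2, c k)))))
      rw [htags, PySem.Set.add_of_not_mem ht, List.map_append]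
      have hfilS : ∀ x, x ∈ PySem.Set.ofList (S.map Prod.fst) ∨ ¬ x = t →
          True := fun _ _ => trivial
      congr 1
      · apply List.map_congr_left
        intro x hx
        have hxt : ¬ t = x := fun h => ht (h ▸ hx)
        rw [List.filter_append]
        have : (([(t, w)] : List (String × String)).filter (fun k => k.1 == x)) = [] := by
          simp [hxt]
        rw [this, List.append_nil]
      · have hfil : S.filter (fun k => k.1 == t) = [] := by
          rw [List.filter_eq_nil_iff]
          intro k hkm hke
          apply ht
          rw [PySem.Set.mem_ofList]
          exact List.mem_map.2 ⟨k, hkm, (by simpa using hke)⟩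
        simp only [List.map_singleton]
        rw [List.filter_append, hfil, List.nil_append]
        have : (([(t, w)] : List (String × String)).filter (fun k => k.1 == t)) = [(t, w)] := by simp
        rw [this]
        simp only [List.map_singleton]
        have hins : PySem.Dict.empty.insert w (c (t, w)) = PySem.Dict.mk [(w, c (t, w))] := by
          apply PySem.Dict.ext
          rw [PySem.Dict.items_insert_of_not_contains _ _ (by simp [PySem.Dict.contains_empty])]
          rfl
        rw [hins]
theorem wcpt_ofList_map_fst (ks : List (String × String)) :
    PySem.Set.ofList ((PySem.Set.ofList ks).map Prod.fst) = PySem.Set.ofList (ks.map Prod.fst) := by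
  induction ks using List.reverseRecOn with
  | nil => rfl
  | append_singleton ks x ih =>
    rw [PySem.Set.ofList_append_singleton, List.map_append, List.map_singleton,
        PySem.Set.ofList_append_singleton]
    by_cases hx : x ∈ PySem.Set.ofList ks
    · rw [PySem.Set.add_of_mem hx, ih]
      have : x.1 ∈ PySem.Set.ofList (ks.map Prod.fst) := by
        rw [PySem.Set.mem_ofList]
        exact List.mem_map.2 ⟨x, (PySem.Set.mem_ofList ks x).mp hx, rfl⟩
      rw [PySem.Set.add_of_mem this]
    · rw [PySem.Set.add_of_not_mem hx, List.map_append, List.map_singleton,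
          PySem.Set.ofList_append_singleton, ih]

theorem wcpt_filter_ofList (ks : List (String × String)) (t : String) :
    ((PySem.Set.ofList ks).filter (fun k => k.1 == t)).map (fun k => k.2)
      = PySem.Set.ofList ((ks.filter (fun k => k.1 == t)).map (fun k => k.2)) := by
  induction ks using List.reverseRecOn with
  | nil => rfl
  | append_singleton ks x ih =>
    rw [PySem.Set.ofList_append_singleton, List.filter_append]
    by_cases hx : x ∈ PySem.Set.ofList ks
    · rw [PySem.Set.add_of_mem hx, ih]
      by_cases hxt : x.1 = t
      · have hxf : x ∈ ks.filter (fun k => k.1 == t) :=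
          List.mem_filter.2 ⟨(PySem.Set.mem_ofList ks x).mp hx, by simp [hxt]⟩
        have : ([x].filter (fun k => k.1 == t)) = [x] := by simp [hxt]
        rw [this, List.map_append, List.map_singleton, PySem.Set.ofList_append_singleton,
            PySem.Set.add_of_mem (by rw [PySem.Set.mem_ofList]; exact List.mem_map.2 ⟨x, hxf, rfl⟩)]
      · have : ([x].filter (fun k => k.1 == t)) = [] := by simp [hxt]
        rw [this, List.append_nil]
    · rw [PySem.Set.add_of_not_mem hx, List.filter_append]
      by_cases hxt : x.1 = t
      · have : ([x].filter (fun k => k.1 == t)) = [x] := by simp [hxt]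
        rw [this, List.map_append, List.map_singleton, List.map_append, List.map_singleton,
            PySem.Set.ofList_append_singleton, ih]
        have hnot : x.2 ∉ PySem.Set.ofList ((ks.filter (fun k => k.1 == t)).map (fun k => k.2)) := by
          rw [PySem.Set.mem_ofList]
          intro hmem
          obtain ⟨k, hkf, hke⟩ := List.mem_map.mp hmem
          obtain ⟨hkm, hkt⟩ := List.mem_filter.mp hkf
          have hkt2 : k.1 = t := by simpa using hkt
          have : k = x := Prod.ext (hkt2.trans hxt.symm) hke
          exact hx ((PySem.Set.mem_ofList ks x).mpr (this ▸ hkm))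
        rw [PySem.Set.add_of_not_mem hnot]
      · have : ([x].filter (fun k => k.1 == t)) = [] := by simp [hxt]
        rw [this, List.append_nil, List.append_nil, ih]

theorem wcpt_key_injective : Function.Injective (fun p : String × String => (p.2, p.1)) := by
  intro a b h
  exact Prod.ext (congrArg Prod.snd h) (congrArg Prod.fst h)


theorem wcpt_foldB_eq_canon (ps : List (String × String)) :
    ((ps.foldl wcptFlatStep PySem.Dict.empty).items).foldl wcptRegroupStep PySem.Dict.empty
      = wcptCanon ps := by
  have hflat : ps.foldl wcptFlatStep PySem.Dict.empty
      = PySem.Dict.counter (ps.map (fun p => (p.2, p.1))) := by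
    rw [← PySem.Dict.foldl_insert_getD_add_one_eq_counter, List.foldl_map]
    rfl
  rw [hflat, PySem.Dict.items_counter]
  set ks := ps.map (fun p => (p.2, p.1)) with hks
  rw [wcpt_regroup (PySem.Set.ofList ks) (fun k => (ks.count k : Int)) (PySem.Set.nodup_ofList ks)]
  unfold wcptCanon wcptTags
  have htags : PySem.Set.ofList ((PySem.Set.ofList ks).map Prod.fst)
      = PySem.Set.ofList (ps.map (fun x => x.2)) := by
    rw [wcpt_ofList_map_fst, hks, List.map_map]
    rfl
  rw [htags]
  apply congrArg
  apply List.map_congr_left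
  intro t ht
  apply congrArg
  apply congrArg
  -- goal: ((ofList ks).filter (·.1==t)).map (fun k => (k.2, count k ks)) = (wcptWords ps t).map (fun w => (w, count (w,t) ps))
  have hmapsplit : ((PySem.Set.ofList ks).filter (fun k => k.1 == t)).map
      (fun k => (k.2, (ks.count k : Int)))
      = (((PySem.Set.ofList ks).filter (fun k => k.1 == t)).map (fun k => k.2)).map
        (fun w => (w, (ps.count (w, t) : Int))) := by
    rw [List.map_map]
    apply List.map_congr_left
    intro k hkf
    obtain ⟨hkm, hkt⟩ := List.mem_filter.mp hkf
    have hkt' : k.1 = t := by simpa using hkt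
    have hcnt : ks.count k = ps.count (k.2, t) := by
      have : k = (t, k.2) := Prod.ext hkt' rfl
      rw [this, hks, show ((t, k.2) : String × String) = (fun p : String × String => (p.2, p.1)) (k.2, t) from rfl]
      exact List.count_map_of_injective ps _ wcpt_key_injective _
    simp [hcnt]
  rw [hmapsplit, wcpt_filter_ofList]
  have hwords : PySem.Set.ofList ((ks.filter (fun k => k.1 == t)).map (fun k => k.2))
      = wcptWords ps t := by
    unfold wcptWords
    rw [hks, List.filter_map, List.map_map]
    rfl
  rw [hwords]

-- ===== VERDICT (by name: the statement is the Claim_ definition above) =====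
theorem words_counter_per_tag_spec : Claim_equal_words_counter_per_tag := by
  intro corpus _
  show _ = _
  unfold words_counter_per_tag words_counter_per_tag_alt
  simp only []
  rw [← List.foldl_flatten, ← List.foldl_flatten, wcpt_foldA_eq_canon, wcpt_foldB_eq_canon]
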